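-- pv_equiv track=rewrite | github.com/rayane-mizouri/runtrack-python-poo | Jour5/Job2.py | factorielle
-- ===== SOURCE A (Python) =====
-- def factorielle(n,x):
--     if n == 0:
--         return 1
--     temp = factorielle(x, n // 2)
--     if n % 2 == 0:
--         return temp * temp
--     else:
--         return x * temp * temp
-- ===== SOURCE B (Python) =====
-- def factorielle(n, x):
--     # iterative descend-then-fold-up using an explicit stack instead of recursion
--     stack = []
--     while n != 0:
--         stack.append((n % 2, x))
--         n, x = x, n // 2
--     result = 1
--     while stack:
--         parity, xi = stack.pop()
--         result = result * result
--         if parity: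
--             result = xi * result
--     return result
-- ===== Notes on version B (the rewrite author's own statement) =====
-- stated objective: alternative
-- what changed: Replaces the mutual-argument-swapping recursion by an explicit iterative descent that pushes each level's (parity, x) on a stack and then folds the result up while popping.
import Mathlib
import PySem

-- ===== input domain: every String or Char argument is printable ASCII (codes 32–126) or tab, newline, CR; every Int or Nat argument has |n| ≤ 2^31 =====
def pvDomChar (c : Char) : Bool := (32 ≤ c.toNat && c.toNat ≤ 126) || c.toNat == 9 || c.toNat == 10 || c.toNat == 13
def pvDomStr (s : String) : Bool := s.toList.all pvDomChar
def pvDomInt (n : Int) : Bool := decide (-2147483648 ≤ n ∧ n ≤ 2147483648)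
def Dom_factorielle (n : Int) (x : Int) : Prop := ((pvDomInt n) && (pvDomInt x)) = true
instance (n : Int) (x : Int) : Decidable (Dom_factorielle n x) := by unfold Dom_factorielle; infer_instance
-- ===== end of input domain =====

-- B replaces the recursion with an explicit stack: descend pushing (parity, x), then fold the
-- result back up while popping; same cost, no recursion ('alternative').
-- Pre_ excludes n < 0 ∧ x < 0, where the Python A recurses forever (RecursionError);
-- both Lean ports use the same fuel bound, amply sufficient on Pre_.

-- ===== PORT A =====
-- literal transliteration of A's recursion; fuel only makes it total (never exhausted on Pre_)
def factorielleGo : Nat → Int → Int → Int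
  | 0, _, _ => 1
  | fuel+1, n, x =>
    if n = 0 then 1
    else
      let temp := factorielleGo fuel x (PySem.Int.floordiv n 2)
      if PySem.Int.mod n 2 = 0 then temp * temp else x * temp * temp

def factorielle (n : Int) (x : Int) : Int :=
  factorielleGo (n.natAbs + x.natAbs + 2) n x

-- ===== PORT B =====
-- descent loop: push (n % 2, x) each level, continue with (x, n // 2); fuel makes it total
def factorielleStack : Nat → Int → Int → List (Int × Int)
  | 0, _, _ => []
  | fuel+1, n, x =>
    if n = 0 then []
    else (PySem.Int.mod n 2, x) :: factorielleStack fuel x (PySem.Int.floordiv n 2)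

-- pop loop: result = result*result, then x*result when that level's parity was odd
def factorielleFoldUp (stack : List (Int × Int)) : Int :=
  stack.foldr (fun pxi result =>
    let r := result * result
    if pxi.1 ≠ 0 then pxi.2 * r else r) 1

def factorielle_alt (n : Int) (x : Int) : Int :=
  factorielleFoldUp (factorielleStack (n.natAbs + x.natAbs + 2) n x)

-- ===== PRECONDITION & SPEC =====
-- Pre_ excludes exactly the inputs (n < 0 and x < 0) on which the Python A never returns (RecursionError).
def Pre_factorielle (n : Int) (x : Int) : Prop := 0 ≤ n ∨ 0 ≤ x
instance (n : Int) (x : Int) : Decidable (Pre_factorielle n x) := by unfold Pre_factorielle; infer_instance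
def pvWitness_factorielle : Int × Int := (7, 3)

def Spec_factorielle (n : Int) (x : Int) (out : Int) : Prop := out = factorielle_alt n x
instance (n : Int) (x : Int) (out : Int) : Decidable (Spec_factorielle n x out) := by unfold Spec_factorielle; infer_instance

-- ===== CLAIM (what is proved, stated in full; the proofs are below) =====
def Claim_equal_factorielle : Prop := ∀ (n : Int) (x : Int), Dom_factorielle n x → Pre_factorielle n x → Spec_factorielle n x (factorielle n x)

-- ===== LEMMAS AND PROOFS =====

-- folding B's stack back up computes exactly A's recursion, for every fuel
theorem foldUp_stack_eq_go (fuel : Nat) : ∀ (n x : Int),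
    factorielleFoldUp (factorielleStack fuel n x) = factorielleGo fuel n x := by
  induction fuel with
  | zero => intro n x; rfl
  | succ f ih =>
    intro n x
    by_cases h : n = 0
    · simp [factorielleStack, factorielleGo, h, factorielleFoldUp]
    · have hm : PySem.Int.mod n 2 = n % 2 := PySem.Int.mod_eq_emod_of_pos (by norm_num)
      have hrange : n % 2 = 0 ∨ n % 2 = 1 := by omega
      simp only [factorielleStack, factorielleGo, if_neg h, factorielleFoldUp,
        List.foldr_cons]
      rw [show (factorielleStack f x (PySem.Int.floordiv n 2)).foldr _ 1 =
        factorielleFoldUp (factorielleStack f x (PySem.Int.floordiv n 2)) from rfl, ih]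
      rcases hrange with h0 | h1
      · simp [h0]
      · simp [h1, mul_assoc]

-- ===== VERDICT (by name: the statement is the Claim_ definition above) =====
theorem factorielle_spec : Claim_equal_factorielle := by
  intro n x _ _
  unfold Spec_factorielle factorielle factorielle_alt
  exact (foldUp_stack_eq_go _ n x).symm
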